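/-
  jsmn_d.bin: `jsmn_parse`, `case ','` (1004A1H – 1004F4H, 28 instructions, one loop, head 1004CDH):
  `if (tokens != NULL && toksuper != -1 && tokens[toksuper].type != ARRAY && … != OBJECT) for (i = toknext - 1; i >= 0; i--) if (tokens[i] is an
  open object or array) { toksuper = i; break; }` = `Jsmn.comma` (with `scanOpenContainer`).
-/
import Prog.Jsmn.D.ScanLemmas

namespace X86
namespace J6
namespace D
open X86.User (CodeAt RegsKept Span FlagsOK Layout toNat_add_ofNat toNat_ofNat_lt' add_ofNat_add)
open Jsmn JsmnDBytes

set_option maxRecDepth 100000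
set_option maxHeartbeats 4000000
set_option linter.unusedSimpArgs false
set_option linter.unusedVariables false

/-! ### The model side -/

theorem body_comma (js : List UInt8) (fuel n : Nat) (s : St) : body Config.default js fuel n s 0x2c = some (comma Config.default s) := by
  simp [body]

/-- The state after the scan of the `,` case: `toksuper` = the nearest open object or array below `toknext`, if there is one. -/
def comRes (s : St) (ts : Tokens) : St :=
  match scanOpenContainer ts s.p.toknext with
  | none => s
  | some j => { s with p := { s.p with toksuper := j } }

theorem comma_none {s : St} (hts : s.toks = none) : comma Config.default s = .next s := by
  simp [comma, hts]

theorem comma_skip {s : St} {ts : Tokens} (hts : s.toks = some ts)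
    (h : s.p.toksuper = -1 ∨ (tokAt ts s.p.toksuper).type = 2 ∨ (tokAt ts s.p.toksuper).type = 1) : comma Config.default s = .next s := by
  simp only [comma, hts, JSMN_ARRAY, JSMN_OBJECT]
  rw [if_neg]
  simp only [Bool.and_eq_true, bne_iff_ne, ne_eq, not_and, Decidable.not_not]
  rintro ⟨h1, h2⟩
  rcases h with h | h | h
  · exact absurd h h1
  · exact absurd h h2
  · exact h

theorem comma_scan {s : St} {ts : Tokens} (hts : s.toks = some ts) (h1 : s.p.toksuper ≠ -1) (h2 : (tokAt ts s.p.toksuper).type ≠ 2)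
    (h3 : (tokAt ts s.p.toksuper).type ≠ 1) (htn : s.p.toknext ≤ 2147483648) : comma Config.default s = .next (comRes s ts) := by
  have hi32 := i32_pred htn
  simp only [comma, hts, JSMN_ARRAY, JSMN_OBJECT, links_default]
  rw [if_pos (by simp [h1, h2, h3])]
  simp only [Bool.false_eq_true, if_false, hi32, comRes]
  by_cases h0 : s.p.toknext = 0
  · rw [if_pos (by omega), h0]; simp [scanOpenContainer]
  · rw [if_neg (by omega)]
    have e : ((s.p.toknext : Int) - 1 + 1).toNat = s.p.toknext := by omega
    rw [e]
    cases hsc : scanOpenContainer ts s.p.toknext <;> simp [hts]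

/-! ### The loop -/

/-- The invariant at the head of the scan (1004CDH): `edx = j - 1`, no open object or array at `j` or above. -/
structure ComInv (c : PCtx) (n : User.Layout) (v0 : User.State) (s : St) (ts : Tokens) (j : Nat) (v : User.State) : Prop where
  rip : v.rip = 0x1004cd
  frame : Frame c n v0 v s
  rdx : v.reg .rdx = UInt64.ofNat (u32 ((j : Int) - 1))
  jle : j ≤ c.numTokens
  scan : scanOpenContainer ts s.p.toknext = scanOpenContainer ts j

theorem com_body {n : User.Layout} {c : PCtx} {v0 v : User.State} {s : St} {ts : Tokens} (hts : s.toks = some ts)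
    (hinv' : Inv Config.default (comRes s ts).p (comRes s ts).toks c.numTokens) (j : Nat) (hi : ComInv c n v0 s ts j v) :
    Reach n v (fun v' => AtNext c n v0 v' (comRes s ts) ∨ ∃ j', j' < j ∧ ComInv c n v0 s ts j' v') := by
  obtain ⟨p, toks, count⟩ := s
  dsimp only at hts
  subst hts
  have hf := hi.frame
  have hfc := hf.core
  have htl := hfc.tlen_some
  have hcode := hfc.code
  have henv := hfc.entry.pre.env
  have hcall := hfc.entry.pre.call
  have hW := hfc.entry.pre.toksW
  v3_open hi henv hcall hW
  j6_bin
  obtain ⟨htb, hlen, htoks⟩ := hi_frame_core_toksArg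
  have hR := hfc.entry.pre.env.toksR.resolve_left htb
  v3_open hR
  j6_bin
  simp only [PCtx.tlen, htl, dataWins] at *
  have htinv := hf.inv.toks ts rfl
  have hsmall := htinv.small
  rcases j with _ | j
  · -- nothing left to look at: toksuper stays
    rw [u32_pred_zero] at hi_rdx
    v3_walk hcode hcall.fetch [] until [0x100462]
    have hres : comRes ⟨p, some ts, count⟩ ts = ⟨p, some ts, count⟩ := by simp [comRes, hi_scan, scanOpenContainer]
    rw [hres]
    exact Reach.done (Or.inl ⟨by simp, hf.of_kept (by simp) (by v3_kept)⟩)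
  · have hj32 : j < 2147483648 := by omega
    rw [u32_pred_succ j (by omega)] at hi_rdx
    have ht := htoks.getD j (by omega)
    have haddr : tokAddr Config.default c.tb j = UInt64.ofNat (16 * j) + c.tb := by
      unfold tokAddr; rw [tokSize_default]; exact UInt64.add_comm _ _
    rw [haddr] at ht
    have hty := ht.type
    have hty32 : (ts.getD j default).type < 2 ^ 32 := hty ▸ User.Mem.readLE4_lt _ _
    obtain ⟨hrs, -, -⟩ := ht.start
    obtain ⟨hre, -, -⟩ := ht.«end»
    have hopen := isOpen_raw ht.start ht.«end»
    rw [hrs, hre] at hopen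
    have hu1 := u32_lt (ts.getD j default).start
    have hu2 := u32_lt (ts.getD j default).«end»
    have hsx : Word.sext (UInt64.ofNat j) 32 = UInt64.ofNat j := by word_omega
    have hsh := shl4_ofNat j (by omega)
    have hpred : u32 ((j : Int) - 1) = (j + 4294967295) % 4294967296 := by unfold u32; omega
    have e1 : ((233 : Nat) == 235) = false := by decide
    have e2 : ((233 : UInt8) == 235) = false := by decide
    have e3 : ((233 : UInt64) == 235) = false := by decide
    v3_walk hcode hcall.fetch [hsx, hsh, e1, e2, e3] until [0x100462, 0x1004cd]
    · -- neither an object nor an array: go on down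
      have hno : ¬ (((ts.getD j default).type = 2 ∨ (ts.getD j default).type = 1) ∧ (ts.getD j default).isOpen = true) := by
        rintro ⟨h | h, -⟩ <;> (rw [h] at hbr_1004e3; exact absurd hbr_1004e3 (by decide))
      refine Reach.done (Or.inr ⟨j, by omega, by simp, hf.of_kept (by simp) (by v3_kept), ?_, by omega, by rw [hi_scan, scanOpenContainer_succ_miss hno]⟩)
      v3_regnorm; rw [hpred]; v3_omega
    · -- start == -1: not open, go on down
      have hno : ¬ (((ts.getD j default).type = 2 ∨ (ts.getD j default).type = 1) ∧ (ts.getD j default).isOpen = true) := by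
        rintro ⟨-, h⟩; rw [hopen] at h; apply h.1; v3_omega
      refine Reach.done (Or.inr ⟨j, by omega, by simp, hf.of_kept (by simp) (by v3_kept), ?_, by omega, by rw [hi_scan, scanOpenContainer_succ_miss hno]⟩)
      v3_regnorm; rw [hpred]; v3_omega
    · -- end != -1: not open, go on down
      have hno : ¬ (((ts.getD j default).type = 2 ∨ (ts.getD j default).type = 1) ∧ (ts.getD j default).isOpen = true) := by
        rintro ⟨-, h⟩; rw [hopen] at h; apply hbr_1004ef; rw [h.2]; rfl
      refine Reach.done (Or.inr ⟨j, by omega, by simp, hf.of_kept (by simp) (by v3_kept), ?_, by omega, by rw [hi_scan, scanOpenContainer_succ_miss hno]⟩)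
      v3_regnorm; rw [hpred]; v3_omega
    · -- an open object or array: toksuper = j
      have hty12 : (ts.getD j default).type = 2 ∨ (ts.getD j default).type = 1 := by v3_omega
      have hyes : (ts.getD j default).isOpen = true := by rw [hopen]; constructor <;> v3_omega
      have hsc : scanOpenContainer ts p.toknext = some j := by rw [hi_scan, scanOpenContainer_succ_hit ⟨hty12, hyes⟩]
      have hres : comRes ⟨p, some ts, count⟩ ts = ⟨{ p with toksuper := j }, some ts, count⟩ := by simp [comRes, hsc]
      rw [hres] at hinv' ⊢
      have hu : u32 (j : Int) = j := by unfold u32; omega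
      refine Reach.done (Or.inl ⟨by simp, ⟨?_, by v3_regnorm; exact hi_frame_r15, ⟨hi_frame_cnt_1, hi_frame_cnt_2⟩, hinv'⟩⟩)
      refine hfc.store_parser (a := c.pa + 8) (by v3_memnorm; rfl) (by v3_kept) (by v3_omega)
        ⟨by v3_frame hi_frame_core_parser_pos, by v3_frame hi_frame_core_parser_toknext,
          holds32_read (by v3_read) ⟨?_, by dsimp only; omega, by dsimp only; omega⟩⟩
      dsimp only; rw [hu]; v3_omega

/-- **1004A1H → 100462H: `case ','` computes `Jsmn.comma`.** -/
theorem comma_reach (sf : SafeFacts binD.cfg) {n : User.Layout} {c : PCtx} {v0 v : User.State} {s : St} {ch : UInt8} {fuel : Nat} (hch : ch = 0x2c)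
    (hc : AtCase c n v0 v s 0x1004a1 ch) : Reach n v (fun v' => Outcome c n v0 v' (body Config.default c.js fuel c.numTokens s ch)) := by
  subst hch
  have hf := hc.frame
  have hsafe := (sf.body c.js fuel c.numTokens s 0x2c hf.inv hf.cnt).1
  rw [binD_cfg, body_comma] at hsafe
  rw [body_comma]
  obtain ⟨p, toks, count⟩ := s
  have hfc := hf.core
  have hcode := hfc.code
  have henv := hfc.entry.pre.env
  have hcall := hfc.entry.pre.call
  have hrip := hc.rip
  have hW := hfc.entry.pre.toksW
  v3_open hf henv hcall hW
  j6_bin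
  cases toks with
  | none =>
    -- counting mode: nothing to do
    have htb : c.tb = 0 := hf_core_toksArg
    rw [comma_none rfl]
    v3_walk hcode hcall.fetch [] until [0x100462]
    exact Reach.done ⟨by simp, hf.of_kept (by simp) (by v3_kept)⟩
  | some ts =>
    have htl := hfc.tlen_some
    obtain ⟨htb, hlen, htoks⟩ := hf_core_toksArg
    have hR := hfc.entry.pre.env.toksR.resolve_left htb
    v3_open hR
    j6_bin
    simp only [PCtx.tlen, htl, dataWins] at *
    have htinv := hf.inv.toks ts rfl
    have hsmall := htinv.small
    have htn : p.toknext ≤ c.numTokens := htinv.toknext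
    have hlo : -1 ≤ p.toksuper := htinv.superLo
    have hhi := htinv.superHi
    simp only [links_default, Bool.false_eq_true, if_false] at hhi
    obtain ⟨hraw, -, -⟩ := hf_core_parser_toksuper
    by_cases hsup : p.toksuper = -1
    · -- no superior token
      rw [comma_skip rfl (Or.inl hsup)]
      rw [hsup, show u32 (-1) = 4294967295 by unfold u32; omega] at hraw
      v3_walk hcode hcall.fetch [] until [0x100462]
      exact Reach.done ⟨by simp, hf.of_kept (by simp) (by v3_kept)⟩
    · obtain ⟨k, hk⟩ : ∃ k : Nat, p.toksuper = k := ⟨p.toksuper.toNat, by omega⟩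
      have hkn : k < c.numTokens := by omega
      rw [hk, show u32 (k : Int) = k by unfold u32; omega] at hraw
      have htk : tokAt ts p.toksuper = ts.getD k default := by rw [hk]; unfold tokAt; rw [if_neg (by omega), Int.toNat_natCast]
      have ht := htoks.getD k (by omega)
      have haddr : tokAddr Config.default c.tb k = c.tb + UInt64.ofNat (16 * k) := by unfold tokAddr; rw [tokSize_default]
      rw [haddr] at ht
      have hty := ht.type
      have hty32 : (ts.getD k default).type < 2 ^ 32 := hty ▸ User.Mem.readLE4_lt _ _
      have hsx : Word.sext (UInt64.ofNat k) 32 = UInt64.ofNat k := by word_omega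
      have hsh := shl4_ofNat k (by omega)
      v3_walk hcode hcall.fetch [hsx, hsh] until [0x100462, 0x1004cd]
      · -- the superior token is an array
        rw [comma_skip rfl (Or.inr (Or.inl (by rw [htk]; v3_omega)))]
        exact Reach.done ⟨by simp, hf.of_kept (by simp) (by v3_kept)⟩
      · -- the superior token is an object
        rw [comma_skip rfl (Or.inr (Or.inr (by rw [htk]; v3_omega)))]
        exact Reach.done ⟨by simp, hf.of_kept (by simp) (by v3_kept)⟩
      · -- a string or a primitive: scan down for the nearest open object or array
        have hcs := comma_scan (s := ⟨p, some ts, count⟩) rfl hsup (by rw [htk]; v3_omega) (by rw [htk]; v3_omega) (by dsimp only; omega)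
        rw [hcs] at hsafe ⊢
        have hinv' := (hsafe _ rfl).1
        refine Reach.loopOn (Inv := ComInv c n v0 ⟨p, some ts, count⟩ ts) (fun k v hi => com_body rfl hinv' k hi) p.toknext _ ?_
        refine ⟨by simp, hf.of_kept (by simp) (by v3_kept), ?_, htn, rfl⟩
        v3_regnorm
        have : u32 ((p.toknext : Int) - 1) = (p.toknext + 4294967295) % 4294967296 := by unfold u32; omega
        rw [this]; v3_omega

/-- `case ','`, as the region statement of Prog/Jsmn/D/ParseInv.lean. -/
theorem comma_spec (sf : SafeFacts binD.cfg) (n : User.Layout) : CommaSpec n := fun _ _ _ _ _ _ hch hc _ => comma_reach sf hch hc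

end D
end J6
end X86
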